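-- pv_equiv track=rewrite | github.com/2829241525/PycharmProjects | algorithm/huawei/06 新冠.py | find_contacts
-- ===== SOURCE A (Python) =====
-- from collections import deque
--
-- def find_contacts(n, confirmed, matrix):
--     # 用集合来记录需要核酸检测的人
--     to_test = set()
--     visited = [False] * n  # 用来标记每个人是否被访问过
--
--     # for i in confirmed:
--     #     visited = [False] * n
--     #     j = matrix[i]
--     #     for ik, vk in enumerate(j):
--     #         if ik not in confirmed and vk == 1 and not visited[ik]:
--     #             to_test.add(ik)
--     #             confirmed.add(ik)
--     #             visited[ik] = True
--     #
--     # return len(to_test)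
--
--     #
--     #
--     # 广度优先搜索 BFS
--     def bfs(start):
--         queue = deque([start])
--         visited[start] = True
--         while queue:
--             person = queue.popleft()
--             for i in range(n):
--                 if matrix[person][i] == 1 and not visited[i]:
--                     visited[i] = True
--                     to_test.add(i)  # 这个人需要做核酸检测
--                     queue.append(i)
--
--     # 对每个确诊病例进行BFS遍历
--     for person in confirmed:
--         if not visited[person]:  # 如果这个人还没有被访问过
--             bfs(person)
--
--     return len(to_test)
-- ===== SOURCE B (Python) =====
-- def find_contacts(n, confirmed, matrix):
--     # Alternative decomposition: no queue and no set -- per confirmed root, saturate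
--     # `visited` to a fixed point over whole-array passes, and count arithmetically:
--     # answer = (#visited) - (#roots that started a search).
--     visited = [False] * n
--     roots = 0
--     for p in confirmed:
--         if not visited[p]:
--             roots += 1
--             visited[p] = True
--             changed = True
--             while changed:
--                 changed = False
--                 for j in range(n):
--                     if visited[j]:
--                         row = matrix[j]
--                         for i in range(n):
--                             if row[i] == 1 and not visited[i]:
--                                 visited[i] = True
--                                 changed = True
--     return sum(visited) - roots
-- ===== Notes on version B (the rewrite author's own statement) =====
-- stated objective: alternative
-- what changed: Replaces the deque-based BFS and the to_test set with per-root fixed-point saturation passes over the whole visited array and an arithmetic count (sum(visited) - number of roots).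
-- outside the precondition, e.g. on find_contacts(2, {-1}, [[0, 0], [0, 0]]): A returns 0, B returns 0; on find_contacts(2, {0}, [[0, 0], [0]]): A returns 0, B returns 0
import Mathlib
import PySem

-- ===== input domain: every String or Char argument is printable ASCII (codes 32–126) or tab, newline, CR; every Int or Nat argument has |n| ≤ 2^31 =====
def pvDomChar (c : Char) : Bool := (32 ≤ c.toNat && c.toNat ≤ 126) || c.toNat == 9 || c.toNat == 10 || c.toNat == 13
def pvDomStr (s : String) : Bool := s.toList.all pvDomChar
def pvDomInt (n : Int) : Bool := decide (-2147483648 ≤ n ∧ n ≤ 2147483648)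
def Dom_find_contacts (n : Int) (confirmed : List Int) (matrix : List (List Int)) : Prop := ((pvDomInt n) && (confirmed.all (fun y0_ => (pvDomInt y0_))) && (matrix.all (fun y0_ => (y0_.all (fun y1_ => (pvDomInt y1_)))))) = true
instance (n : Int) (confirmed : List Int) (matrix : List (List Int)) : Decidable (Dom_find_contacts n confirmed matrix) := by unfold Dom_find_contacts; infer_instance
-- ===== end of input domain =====

-- B replaces A's deque BFS + to_test set by per-root fixed-point saturation passes over
-- the visited array and an arithmetic count (alternative decomposition, not faster).
-- Indexing is via pyGetD/pySetD; Pre_ keeps every accessed index in range, where they are exact.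

-- ===== PORT A =====
-- inner 'for i in range(n)' body of bfs: state (visited, to_test, queue-remainder)
def innerStepA (matrix : List (List Int)) (person : Int)
    (s : List Bool × PySem.Set Int × List Int) (i : Int) :
    List Bool × PySem.Set Int × List Int :=
  if PySem.List.pyGetD (PySem.List.pyGetD matrix person []) i 0 == 1
      && !(PySem.List.pyGetD s.1 i false) then
    (PySem.List.pySetD s.1 i true, PySem.Set.add s.2.1 i, s.2.2 ++ [i])
  else s

-- 'while queue:' loop; fuel 2*n.toNat+1 bounds the step count (measure 2·#unvisited+|queue|,
-- proved sufficient in bfsA_main below, so the 0-fuel branch is never reached under Pre_)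
def bfsA (n : Int) (matrix : List (List Int)) :
    Nat → List Int → List Bool → PySem.Set Int → List Bool × PySem.Set Int
  | 0, _, v, t => (v, t)
  | _ + 1, [], v, t => (v, t)
  | fuel + 1, person :: queue, v, t =>
    let st := (PySem.List.pyRange 0 n 1).foldl (innerStepA matrix person) (v, t, queue)
    bfsA n matrix fuel st.2.2 st.1 st.2.1

-- 'for person in confirmed: if not visited[person]: bfs(person)'
def stepOutA (n : Int) (matrix : List (List Int))
    (s : List Bool × PySem.Set Int) (person : Int) : List Bool × PySem.Set Int :=
  if !(PySem.List.pyGetD s.1 person false) then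
    bfsA n matrix (2 * n.toNat + 1) [person] (PySem.List.pySetD s.1 person true) s.2
  else s

def find_contacts (n : Int) (confirmed : List Int) (matrix : List (List Int)) : Int :=
  let st := confirmed.foldl (stepOutA n matrix) (List.replicate n.toNat false, PySem.Set.empty)
  PySem.Set.len st.2

-- ===== PORT B =====
-- inner 'for i in range(n)' of a pass: state (visited, changed)
def innerStepB (row : List Int) (s : List Bool × Bool) (i : Int) : List Bool × Bool :=
  if PySem.List.pyGetD row i 0 == 1 && !(PySem.List.pyGetD s.1 i false) then
    (PySem.List.pySetD s.1 i true, true)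
  else s

-- 'for j in range(n): if visited[j]: row = matrix[j]; …'
def outerStepB (n : Int) (matrix : List (List Int)) (s : List Bool × Bool) (j : Int) :
    List Bool × Bool :=
  if PySem.List.pyGetD s.1 j false then
    let row := PySem.List.pyGetD matrix j []
    (PySem.List.pyRange 0 n 1).foldl (innerStepB row) s
  else s

-- one whole-array pass with 'changed = False' at entry
def passB (n : Int) (matrix : List (List Int)) (v : List Bool) : List Bool × Bool :=
  (PySem.List.pyRange 0 n 1).foldl (outerStepB n matrix) (v, false)

-- 'while changed:'; fuel n.toNat+1 bounds the pass count (each non-final pass flips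
-- at least one entry; sufficiency proved in satB_main below)
def satB (n : Int) (matrix : List (List Int)) : Nat → List Bool → List Bool
  | 0, v => v
  | fuel + 1, v =>
    let s := passB n matrix v
    if s.2 then satB n matrix fuel s.1 else s.1

-- 'for p in confirmed: if not visited[p]: roots += 1; visited[p] = True; while changed: …'
def stepOutB (n : Int) (matrix : List (List Int)) (s : List Bool × Int) (p : Int) :
    List Bool × Int :=
  if !(PySem.List.pyGetD s.1 p false) then
    (satB n matrix (n.toNat + 1) (PySem.List.pySetD s.1 p true), s.2 + 1)
  else s

def find_contacts_alt (n : Int) (confirmed : List Int) (matrix : List (List Int)) : Int :=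
  let st := confirmed.foldl (stepOutB n matrix) (List.replicate n.toNat false, 0)
  (st.1.foldl (fun (a : Int) b => a + (if b then 1 else 0)) 0) - st.2

-- ===== PRECONDITION & SPEC =====
-- Pre_ restricts to the natural domain — confirmed person indices in [0, n) and an
-- adjacency matrix with at least n rows of at least n entries — excluding inputs where A
-- either raises IndexError or returns only via Python negative-index wraparound / by
-- never touching missing rows (a defensible corner outside the intended n×n-matrix domain).
def Pre_find_contacts (n : Int) (confirmed : List Int) (matrix : List (List Int)) : Prop :=
  (∀ p ∈ confirmed, 0 ≤ p ∧ p < n) ∧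
    (confirmed = [] ∨ (n ≤ (matrix.length : Int) ∧
      ∀ row ∈ matrix.take n.toNat, n ≤ (row.length : Int)))
instance (n : Int) (confirmed : List Int) (matrix : List (List Int)) : Decidable (Pre_find_contacts n confirmed matrix) := by unfold Pre_find_contacts; infer_instance

def pvWitness_find_contacts : Int × List Int × List (List Int) := (2, [0], [[0, 1], [0, 0]])

def Spec_find_contacts (n : Int) (confirmed : List Int) (matrix : List (List Int)) (out : Int) : Prop := out = find_contacts_alt n confirmed matrix
instance (n : Int) (confirmed : List Int) (matrix : List (List Int)) (out : Int) : Decidable (Spec_find_contacts n confirmed matrix out) := by unfold Spec_find_contacts; infer_instance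

-- ===== CLAIM (what is proved, stated in full; the proofs are below) =====
def Claim_equal_find_contacts : Prop := ∀ (n : Int) (confirmed : List Int) (matrix : List (List Int)), Dom_find_contacts n confirmed matrix → Pre_find_contacts n confirmed matrix → Spec_find_contacts n confirmed matrix (find_contacts n confirmed matrix)

-- ===== LEMMAS AND PROOFS =====

-- visited-array view at a Nat index
def pvVG (v : List Bool) (k : Nat) : Bool := v.getD k false
-- adjacency at Nat indices
def pvEN (matrix : List (List Int)) (j i : Nat) : Prop := (matrix.getD j []).getD i 0 = 1
-- number of visited entries
def pvTC (v : List Bool) : Nat := v.countP id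
-- edge-closed visited set
def pvClosed (n : Int) (matrix : List (List Int)) (v : List Bool) : Prop :=
  ∀ j i : Nat, j < n.toNat → i < n.toNat → pvVG v j = true → pvEN matrix j i → pvVG v i = true
-- pointwise inclusion
def pvLe (v w : List Bool) : Prop := ∀ k : Nat, pvVG v k = true → pvVG w k = true

theorem pvVG_set_self {v : List Bool} {k : Nat} (h : k < v.length) :
    pvVG (v.set k true) k = true := by
  simp [pvVG, List.getD_eq_getElem?_getD, h]

theorem pvVG_set_mono {v : List Bool} {k m : Nat} (h : pvVG v m = true) :
    pvVG (v.set k true) m = true := by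
  simp [pvVG, List.getD_eq_getElem?_getD, List.getElem?_set] at *
  by_cases e : k = m <;> simp [e] at *
  · split <;> simp_all
  · exact h

theorem pvVG_set_cases {v : List Bool} {k m : Nat} (h : pvVG (v.set k true) m = true) :
    m = k ∨ pvVG v m = true := by
  simp [pvVG, List.getD_eq_getElem?_getD, List.getElem?_set] at *
  by_cases e : k = m <;> simp [e] at h
  · left; omega
  · right; exact h

theorem pvTC_set {v : List Bool} {k : Nat} (hk : k < v.length) (hf : pvVG v k = false) :
    pvTC (v.set k true) = pvTC v + 1 := by
  simp only [pvTC, pvVG] at *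
  induction v generalizing k with
  | nil => simp at hk
  | cons a tl ih =>
    cases k with
    | zero => simp [List.getD_eq_getElem?_getD] at hf; simp [List.set, hf]
    | succ k =>
      simp at hk
      simp [List.getD_eq_getElem?_getD] at hf
      simp only [List.set, List.countP_cons]
      rw [ih hk (by simp [List.getD_eq_getElem?_getD, hf])]
      omega

theorem pvTC_le_length (v : List Bool) : pvTC v ≤ v.length := List.countP_le_length

theorem pvEq_of_le {v w : List Bool} (hlen : v.length = w.length)
    (h1 : pvLe v w) (h2 : pvLe w v) : v = w := by
  apply List.ext_getElem hlen
  intro i hi hw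
  have e1 := h1 i; have e2 := h2 i
  simp [pvVG, List.getD_eq_getElem?_getD, hi, hw] at e1 e2
  cases hv : v[i] <;> cases hw2 : w[i] <;> simp_all

theorem pvVG_replicate (N k : Nat) : pvVG (List.replicate N false) k = false := by
  simp [pvVG, List.getD_eq_getElem?_getD, List.getElem?_replicate]; split <;> simp

theorem pvTC_replicate (N : Nat) : pvTC (List.replicate N false) = 0 := by simp [pvTC]

theorem pvSumFold (v : List Bool) (a : Int) :
    v.foldl (fun (a : Int) b => a + (if b then 1 else 0)) a = a + (pvTC v : Int) := by
  simp only [pvTC]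
  induction v generalizing a with
  | nil => simp
  | cons b tl ih =>
    cases b
    · simp [ih]
    · simp [ih]; ring

-- ---------- A side: the inner for-loop ----------

theorem stepA_flip (matrix : List (List Int)) (p i : Int) (v : List Bool) (t : PySem.Set Int)
    (q : List Int) (hp : 0 ≤ p) (hi : 0 ≤ i) (hE : pvEN matrix p.toNat i.toNat)
    (hV : pvVG v i.toNat = false) :
    innerStepA matrix p (v, t, q) i = (v.set i.toNat true, PySem.Set.add t i, q ++ [i]) := by
  simp only [pvEN] at hE; simp only [pvVG] at hV
  simp [innerStepA, PySem.List.pyGetD_of_nonneg _ _ hp, PySem.List.pyGetD_of_nonneg _ _ hi,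
    PySem.List.pySetD_of_nonneg _ _ hi, List.getD_eq_getElem?_getD] at *
  simp [hE, hV]

theorem stepA_skip (matrix : List (List Int)) (p i : Int) (v : List Bool) (t : PySem.Set Int)
    (q : List Int) (hp : 0 ≤ p) (hi : 0 ≤ i)
    (h : pvEN matrix p.toNat i.toNat → pvVG v i.toNat = true) :
    innerStepA matrix p (v, t, q) i = (v, t, q) := by
  simp only [pvEN] at h; simp only [pvVG] at h
  simp [innerStepA, PySem.List.pyGetD_of_nonneg _ _ hp, PySem.List.pyGetD_of_nonneg _ _ hi,
    List.getD_eq_getElem?_getD] at *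
  exact fun h1 => h h1

theorem pvSetAddNotMem (t : PySem.Set Int) (i : Int) (h : i ∉ t) :
    PySem.Set.add t i = t ++ [i] := by
  simp [PySem.Set.add, PySem.Set.contains, h]

theorem pvNodupApp (t : PySem.Set Int) (i : Int) (h : i ∉ t) (hnd : t.Nodup) :
    (t ++ [i]).Nodup := by
  simp [List.nodup_append, hnd]; rintro a ha rfl; exact h ha

theorem innerA_main (n p : Int) (matrix : List (List Int)) (hp0 : 0 ≤ p) :
    ∀ (L : List Int) (v : List Bool) (t : PySem.Set Int) (q : List Int),
    (∀ i ∈ L, 0 ≤ i ∧ i < n) → v.length = n.toNat →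
    (∀ x ∈ q, 0 ≤ x ∧ x < n ∧ pvVG v x.toNat = true) →
    (∀ x ∈ t, 0 ≤ x ∧ x < n ∧ pvVG v x.toNat = true) → t.Nodup →
    (L.foldl (innerStepA matrix p) (v, t, q)).1.length = n.toNat ∧
    pvLe v (L.foldl (innerStepA matrix p) (v, t, q)).1 ∧
    (∀ k : Nat, pvVG (L.foldl (innerStepA matrix p) (v, t, q)).1 k = true →
      pvVG v k = true ∨ (k : Int) ∈ (L.foldl (innerStepA matrix p) (v, t, q)).2.2) ∧
    (∀ x ∈ q, x ∈ (L.foldl (innerStepA matrix p) (v, t, q)).2.2) ∧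
    (∀ i ∈ L, pvEN matrix p.toNat i.toNat →
      pvVG (L.foldl (innerStepA matrix p) (v, t, q)).1 i.toNat = true) ∧
    (∀ x ∈ (L.foldl (innerStepA matrix p) (v, t, q)).2.2,
      0 ≤ x ∧ x < n ∧ pvVG (L.foldl (innerStepA matrix p) (v, t, q)).1 x.toNat = true) ∧
    (L.foldl (innerStepA matrix p) (v, t, q)).2.2.length + pvTC v
      = q.length + pvTC (L.foldl (innerStepA matrix p) (v, t, q)).1 ∧
    pvTC v ≤ pvTC (L.foldl (innerStepA matrix p) (v, t, q)).1 ∧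
    (∀ T : List Bool, pvClosed n matrix T → pvLe v T → pvVG T p.toNat = true → p < n →
      pvLe (L.foldl (innerStepA matrix p) (v, t, q)).1 T ∧
      ((∀ x ∈ q, pvVG T x.toNat = true) →
        ∀ x ∈ (L.foldl (innerStepA matrix p) (v, t, q)).2.2, pvVG T x.toNat = true)) ∧
    (∀ x ∈ (L.foldl (innerStepA matrix p) (v, t, q)).2.1,
      0 ≤ x ∧ x < n ∧ pvVG (L.foldl (innerStepA matrix p) (v, t, q)).1 x.toNat = true) ∧
    (L.foldl (innerStepA matrix p) (v, t, q)).2.1.Nodup ∧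
    (L.foldl (innerStepA matrix p) (v, t, q)).2.1.length + pvTC v
      = t.length + pvTC (L.foldl (innerStepA matrix p) (v, t, q)).1 := by
  intro L
  induction L with
  | nil =>
    intro v t q _ hlen hq ht hnd
    simp only [List.foldl_nil]
    exact ⟨hlen, fun k h => h, fun k h => Or.inl h, fun x hx => hx, by simp, hq, trivial,
      le_refl _, fun T _ hvT _ _ => ⟨hvT, fun h x hx => h x hx⟩, ht, hnd, trivial⟩
  | cons i L ih =>
    intro v t q hL hlen hq ht hnd
    obtain ⟨hi0, hin⟩ := hL i (List.mem_cons_self ..)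
    have hL' : ∀ x ∈ L, 0 ≤ x ∧ x < n := fun x hx => hL x (List.mem_cons_of_mem _ hx)
    have hiN : i.toNat < n.toNat := by omega
    by_cases hg : pvEN matrix p.toNat i.toNat ∧ pvVG v i.toNat = false
    · have hnm : i ∉ t := fun hm => by
        have h2 := (ht i hm).2.2
        rw [hg.2] at h2; exact Bool.false_ne_true h2
      rw [List.foldl_cons, stepA_flip matrix p i v t q hp0 hi0 hg.1 hg.2, pvSetAddNotMem t i hnm]
      have hlen' : (v.set i.toNat true).length = n.toNat := by simpa using hlen
      have hself : pvVG (v.set i.toNat true) i.toNat = true := pvVG_set_self (by omega)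
      have hq' : ∀ x ∈ q ++ [i], 0 ≤ x ∧ x < n ∧ pvVG (v.set i.toNat true) x.toNat = true := by
        intro x hx
        rcases List.mem_append.1 hx with hx | hx
        · obtain ⟨a, b, c⟩ := hq x hx; exact ⟨a, b, pvVG_set_mono c⟩
        · simp at hx; subst hx; exact ⟨hi0, hin, hself⟩
      have ht' : ∀ x ∈ t ++ [i], 0 ≤ x ∧ x < n ∧ pvVG (v.set i.toNat true) x.toNat = true := by
        intro x hx
        rcases List.mem_append.1 hx with hx | hx
        · obtain ⟨a, b, c⟩ := ht x hx; exact ⟨a, b, pvVG_set_mono c⟩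
        · simp at hx; subst hx; exact ⟨hi0, hin, hself⟩
      obtain ⟨c1, c2, c3, c4, c5, c6, c7, c8, c9, c10, c11, c12⟩ :=
        ih (v.set i.toNat true) (t ++ [i]) (q ++ [i]) hL' hlen' hq' ht' (pvNodupApp t i hnm hnd)
      have hTC : pvTC (v.set i.toNat true) = pvTC v + 1 := pvTC_set (by omega) hg.2
      have hm7 := c7; rw [hTC] at hm7; simp only [List.length_append, List.length_cons,
        List.length_nil] at hm7
      have hm12 := c12; rw [hTC] at hm12; simp only [List.length_append, List.length_cons,
        List.length_nil] at hm12
      refine ⟨c1, ?_, ?_, ?_, ?_, c6, by omega, by omega, ?_, c10, c11, by omega⟩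
      · exact fun k h => c2 k (pvVG_set_mono h)
      · intro k hk
        rcases c3 k hk with h | h
        · rcases pvVG_set_cases h with rfl | h
          · rw [Int.toNat_of_nonneg hi0]; exact Or.inr (c4 i (by simp))
          · exact Or.inl h
        · exact Or.inr h
      · exact fun x hx => c4 x (List.mem_append_left _ hx)
      · intro x hx hE
        rcases List.mem_cons.1 hx with rfl | hx
        · exact c2 _ hself
        · exact c5 x hx hE
      · intro T hTcl hvT hTp hpn
        have hTi : pvVG T i.toNat = true := hTcl p.toNat i.toNat (by omega) hiN hTp hg.1
        have hvT' : pvLe (v.set i.toNat true) T := by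
          intro k hk
          rcases pvVG_set_cases hk with rfl | hk
          · exact hTi
          · exact hvT k hk
        obtain ⟨d1, d2⟩ := c9 T hTcl hvT' hTp hpn
        refine ⟨d1, fun hqT => d2 ?_⟩
        intro x hx
        rcases List.mem_append.1 hx with hx | hx
        · exact hqT x hx
        · simp at hx; subst hx; exact hTi
    · push_neg at hg
      have hsk : pvEN matrix p.toNat i.toNat → pvVG v i.toNat = true := by
        intro hE; have := hg hE; simpa using this
      rw [List.foldl_cons, stepA_skip matrix p i v t q hp0 hi0 hsk]
      obtain ⟨c1, c2, c3, c4, c5, c6, c7, c8, c9, c10, c11, c12⟩ := ih v t q hL' hlen hq ht hnd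
      refine ⟨c1, c2, c3, c4, ?_, c6, c7, c8, c9, c10, c11, c12⟩
      intro x hx hE
      rcases List.mem_cons.1 hx with rfl | hx
      · exact c2 _ (hsk hE)
      · exact c5 x hx hE

-- ---------- A side: the while-queue loop ----------

theorem bfsA_main (n : Int) (matrix : List (List Int)) :
    ∀ (fuel : Nat) (q : List Int) (v : List Bool) (t : PySem.Set Int),
    v.length = n.toNat →
    (∀ x ∈ q, 0 ≤ x ∧ x < n ∧ pvVG v x.toNat = true) →
    (∀ k : Nat, k < n.toNat → pvVG v k = true → (k : Int) ∉ q →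
      ∀ i : Nat, i < n.toNat → pvEN matrix k i → pvVG v i = true) →
    (∀ x ∈ t, 0 ≤ x ∧ x < n ∧ pvVG v x.toNat = true) → t.Nodup →
    2 * (n.toNat - pvTC v) + q.length ≤ fuel →
    (bfsA n matrix fuel q v t).1.length = n.toNat ∧
    pvLe v (bfsA n matrix fuel q v t).1 ∧
    pvClosed n matrix (bfsA n matrix fuel q v t).1 ∧
    (∀ T : List Bool, pvClosed n matrix T → pvLe v T →
      (∀ x ∈ q, pvVG T x.toNat = true) → pvLe (bfsA n matrix fuel q v t).1 T) ∧
    (∀ x ∈ (bfsA n matrix fuel q v t).2,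
      0 ≤ x ∧ x < n ∧ pvVG (bfsA n matrix fuel q v t).1 x.toNat = true) ∧
    (bfsA n matrix fuel q v t).2.Nodup ∧
    (bfsA n matrix fuel q v t).2.length + pvTC v = t.length + pvTC (bfsA n matrix fuel q v t).1 := by
  intro fuel
  induction fuel with
  | zero =>
    intro q v t hlen hq hFr ht hnd hfuel
    have hq0 : q = [] := by
      cases q with
      | nil => rfl
      | cons a q => simp at hfuel
    subst hq0
    simp only [bfsA]
    exact ⟨hlen, fun k h => h, fun j i hj hi hvj hE => hFr j hj hvj (by simp) i hi hE,
      fun T _ hvT _ => hvT, ht, hnd, by trivial⟩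
  | succ fuel ih =>
    intro q v t hlen hq hFr ht hnd hfuel
    cases q with
    | nil =>
      simp only [bfsA]
      exact ⟨hlen, fun k h => h, fun j i hj hi hvj hE => hFr j hj hvj (by simp) i hi hE,
        fun T _ hvT _ => hvT, ht, hnd, by trivial⟩
    | cons p q =>
      simp only [bfsA]
      obtain ⟨hp0, hpn, hvp⟩ := hq p (List.mem_cons_self ..)
      have hq' : ∀ x ∈ q, 0 ≤ x ∧ x < n ∧ pvVG v x.toNat = true :=
        fun x hx => hq x (List.mem_cons_of_mem _ hx)
      have hLgood : ∀ i ∈ PySem.List.pyRange 0 n 1, 0 ≤ i ∧ i < n :=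
        fun i hi => PySem.List.mem_pyRange_one.1 hi
      obtain ⟨c1, c2, c3, c4, c5, c6, c7, c8, c9, c10, c11, c12⟩ :=
        innerA_main n p matrix hp0 (PySem.List.pyRange 0 n 1) v t q hLgood hlen hq' ht hnd
      have hFr1 : ∀ k : Nat, k < n.toNat →
          pvVG ((PySem.List.pyRange 0 n 1).foldl (innerStepA matrix p) (v, t, q)).1 k = true →
          (k : Int) ∉ ((PySem.List.pyRange 0 n 1).foldl (innerStepA matrix p) (v, t, q)).2.2 →
          ∀ i : Nat, i < n.toNat → pvEN matrix k i →
          pvVG ((PySem.List.pyRange 0 n 1).foldl (innerStepA matrix p) (v, t, q)).1 i = true := by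
        intro k hk hvk hknot i hi hE
        by_cases hvk0 : pvVG v k = true
        · by_cases hkp : k = p.toNat
          · subst hkp
            have hmem : ((i : Int)) ∈ PySem.List.pyRange 0 n 1 :=
              PySem.List.mem_pyRange_one.2 ⟨by omega, by omega⟩
            have := c5 (i : Int) hmem (by simpa using hE)
            simpa using this
          · have hknotq : (k : Int) ∉ p :: q := by
              intro hmem
              rcases List.mem_cons.1 hmem with he | hmem
              · exact hkp (by omega)
              · exact hknot (c4 _ hmem)
            exact c2 i (hFr k hk hvk0 hknotq i hi hE)
        · rcases c3 k hvk with h | h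
          · exact absurd h hvk0
          · exact absurd h hknot
      have hTC1 := pvTC_le_length ((PySem.List.pyRange 0 n 1).foldl (innerStepA matrix p) (v, t, q)).1
      rw [c1] at hTC1
      obtain ⟨d1, d2, d3, d4, d5, d6, d7⟩ := ih _ _ _ c1 c6 hFr1 c10 c11 (by simp at hfuel; omega)
      refine ⟨d1, fun k h => d2 k (c2 k h), d3, ?_, d5, d6, by omega⟩
      intro T hTcl hvT hqT
      obtain ⟨e1, e2⟩ := c9 T hTcl hvT (hqT p (List.mem_cons_self ..)) hpn
      exact d4 T hTcl e1 (e2 fun x hx => hqT x (List.mem_cons_of_mem _ hx))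

-- ---------- B side: inner loop, pass, saturation ----------

theorem stepB_flip (matrix : List (List Int)) (j i : Int) (v : List Bool) (b : Bool)
    (hj : 0 ≤ j) (hi : 0 ≤ i) (hE : pvEN matrix j.toNat i.toNat)
    (hV : pvVG v i.toNat = false) :
    innerStepB (PySem.List.pyGetD matrix j []) (v, b) i = (v.set i.toNat true, true) := by
  simp only [pvEN] at hE; simp only [pvVG] at hV
  simp [innerStepB, PySem.List.pyGetD_of_nonneg _ _ hj, PySem.List.pyGetD_of_nonneg _ _ hi,
    PySem.List.pySetD_of_nonneg _ _ hi, List.getD_eq_getElem?_getD] at *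
  simp [hE, hV]

theorem stepB_skip (matrix : List (List Int)) (j i : Int) (v : List Bool) (b : Bool)
    (hj : 0 ≤ j) (hi : 0 ≤ i)
    (h : pvEN matrix j.toNat i.toNat → pvVG v i.toNat = true) :
    innerStepB (PySem.List.pyGetD matrix j []) (v, b) i = (v, b) := by
  have hg : (PySem.List.pyGetD (PySem.List.pyGetD matrix j []) i 0 == 1
      && !(PySem.List.pyGetD v i false)) = false := by
    simp only [pvEN, pvVG] at h
    simp [PySem.List.pyGetD_of_nonneg _ _ hj, PySem.List.pyGetD_of_nonneg _ _ hi,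
      List.getD_eq_getElem?_getD]
    exact h
  simp [innerStepB, hg]

theorem stepOutB_vis (n j : Int) (matrix : List (List Int)) (v : List Bool) (b : Bool)
    (hj : 0 ≤ j) (h : pvVG v j.toNat = true) :
    outerStepB n matrix (v, b) j
      = (PySem.List.pyRange 0 n 1).foldl (innerStepB (PySem.List.pyGetD matrix j [])) (v, b) := by
  simp only [pvVG] at h
  simp [outerStepB, PySem.List.pyGetD_of_nonneg _ _ hj, List.getD_eq_getElem?_getD] at *
  simp [h]

theorem stepOutB_skip (n j : Int) (matrix : List (List Int)) (v : List Bool) (b : Bool)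
    (hj : 0 ≤ j) (h : pvVG v j.toNat = false) :
    outerStepB n matrix (v, b) j = (v, b) := by
  simp only [pvVG] at h
  simp [outerStepB, PySem.List.pyGetD_of_nonneg _ _ hj, List.getD_eq_getElem?_getD] at *
  simp [h]

theorem innerB_main (n j : Int) (matrix : List (List Int)) (hj0 : 0 ≤ j) :
    ∀ (L : List Int) (v : List Bool) (b : Bool),
    (∀ i ∈ L, 0 ≤ i ∧ i < n) → v.length = n.toNat →
    (L.foldl (innerStepB (PySem.List.pyGetD matrix j [])) (v, b)).1.length = n.toNat ∧
    pvLe v (L.foldl (innerStepB (PySem.List.pyGetD matrix j [])) (v, b)).1 ∧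
    (b = true → (L.foldl (innerStepB (PySem.List.pyGetD matrix j [])) (v, b)).2 = true) ∧
    ((L.foldl (innerStepB (PySem.List.pyGetD matrix j [])) (v, b)).2 = false →
      (L.foldl (innerStepB (PySem.List.pyGetD matrix j [])) (v, b)).1 = v ∧
      ∀ i ∈ L, pvEN matrix j.toNat i.toNat → pvVG v i.toNat = true) ∧
    (∀ T : List Bool, pvClosed n matrix T → pvLe v T → pvVG T j.toNat = true → j < n →
      pvLe (L.foldl (innerStepB (PySem.List.pyGetD matrix j [])) (v, b)).1 T) ∧
    pvTC v ≤ pvTC (L.foldl (innerStepB (PySem.List.pyGetD matrix j [])) (v, b)).1 ∧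
    ((L.foldl (innerStepB (PySem.List.pyGetD matrix j [])) (v, b)).2 = true →
      b = true ∨ pvTC v < pvTC (L.foldl (innerStepB (PySem.List.pyGetD matrix j [])) (v, b)).1) := by
  intro L
  induction L with
  | nil =>
    intro v b _ hlen
    simp only [List.foldl_nil]
    exact ⟨hlen, fun k h => h, fun h => h, fun h => ⟨by simp, by simp⟩,
      fun T _ hvT _ _ => hvT, le_refl _, fun h => Or.inl h⟩
  | cons i L ih =>
    intro v b hL hlen
    obtain ⟨hi0, hin⟩ := hL i (List.mem_cons_self ..)
    have hL' : ∀ x ∈ L, 0 ≤ x ∧ x < n := fun x hx => hL x (List.mem_cons_of_mem _ hx)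
    have hiN : i.toNat < n.toNat := by omega
    by_cases hg : pvEN matrix j.toNat i.toNat ∧ pvVG v i.toNat = false
    · rw [List.foldl_cons, stepB_flip matrix j i v b hj0 hi0 hg.1 hg.2]
      have hlen' : (v.set i.toNat true).length = n.toNat := by simpa using hlen
      obtain ⟨c1, c2, c3, c4, c5, c6, c7⟩ := ih (v.set i.toNat true) true hL' hlen'
      have hself : pvVG (v.set i.toNat true) i.toNat = true := pvVG_set_self (by omega)
      have hTC : pvTC (v.set i.toNat true) = pvTC v + 1 := pvTC_set (by omega) hg.2
      refine ⟨c1, fun k h => c2 k (pvVG_set_mono h), fun _ => c3 rfl, ?_, ?_, by omega, ?_⟩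
      · intro hfa
        exact absurd (c3 rfl) (by simp [hfa])
      · intro T hTcl hvT hTj hjn
        have hTi : pvVG T i.toNat = true := hTcl j.toNat i.toNat (by omega) hiN hTj hg.1
        refine c5 T hTcl ?_ hTj hjn
        intro k hk
        rcases pvVG_set_cases hk with rfl | hk
        · exact hTi
        · exact hvT k hk
      · intro _; exact Or.inr (by omega)
    · push_neg at hg
      have hsk : pvEN matrix j.toNat i.toNat → pvVG v i.toNat = true := by
        intro hE; have := hg hE; simpa using this
      rw [List.foldl_cons, stepB_skip matrix j i v b hj0 hi0 hsk]
      obtain ⟨c1, c2, c3, c4, c5, c6, c7⟩ := ih v b hL' hlen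
      refine ⟨c1, c2, c3, ?_, c5, c6, c7⟩
      intro hfa
      obtain ⟨e1, e2⟩ := c4 hfa
      refine ⟨e1, ?_⟩
      intro x hx hE
      rcases List.mem_cons.1 hx with rfl | hx
      · exact hsk hE
      · exact e2 x hx hE

theorem passB_main (n : Int) (matrix : List (List Int)) :
    ∀ (L : List Int) (v : List Bool) (b : Bool),
    (∀ i ∈ L, 0 ≤ i ∧ i < n) → v.length = n.toNat →
    (L.foldl (outerStepB n matrix) (v, b)).1.length = n.toNat ∧
    pvLe v (L.foldl (outerStepB n matrix) (v, b)).1 ∧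
    (b = true → (L.foldl (outerStepB n matrix) (v, b)).2 = true) ∧
    ((L.foldl (outerStepB n matrix) (v, b)).2 = false →
      (L.foldl (outerStepB n matrix) (v, b)).1 = v ∧
      ∀ j ∈ L, pvVG v j.toNat = true →
        ∀ i : Nat, i < n.toNat → pvEN matrix j.toNat i → pvVG v i = true) ∧
    (∀ T : List Bool, pvClosed n matrix T → pvLe v T →
      pvLe (L.foldl (outerStepB n matrix) (v, b)).1 T) ∧
    pvTC v ≤ pvTC (L.foldl (outerStepB n matrix) (v, b)).1 ∧
    ((L.foldl (outerStepB n matrix) (v, b)).2 = true →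
      b = true ∨ pvTC v < pvTC (L.foldl (outerStepB n matrix) (v, b)).1) := by
  intro L
  induction L with
  | nil =>
    intro v b _ hlen
    simp only [List.foldl_nil]
    exact ⟨hlen, fun k h => h, fun h => h, fun h => ⟨by simp, by simp⟩,
      fun T _ hvT => hvT, le_refl _, fun h => Or.inl h⟩
  | cons j L ih =>
    intro v b hL hlen
    obtain ⟨hj0, hjn⟩ := hL j (List.mem_cons_self ..)
    have hL' : ∀ x ∈ L, 0 ≤ x ∧ x < n := fun x hx => hL x (List.mem_cons_of_mem _ hx)
    have hLgood : ∀ i ∈ PySem.List.pyRange 0 n 1, 0 ≤ i ∧ i < n :=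
      fun i hi => PySem.List.mem_pyRange_one.1 hi
    cases hvj : pvVG v j.toNat with
    | true =>
      rw [List.foldl_cons, stepOutB_vis n j matrix v b hj0 hvj]
      obtain ⟨e1, e2, e3, e4, e5, e6, e7⟩ :=
        innerB_main n j matrix hj0 (PySem.List.pyRange 0 n 1) v b hLgood hlen
      obtain ⟨d1, d2, d3, d4, d5, d6, d7⟩ := ih _ _ hL' e1
      refine ⟨d1, fun k h => d2 k (e2 k h), fun h => d3 (e3 h), ?_, ?_, le_trans e6 d6, ?_⟩
      · intro hfa
        have hs2 : ((PySem.List.pyRange 0 n 1).foldl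
            (innerStepB (PySem.List.pyGetD matrix j [])) (v, b)).2 = false := by
          cases hs : ((PySem.List.pyRange 0 n 1).foldl
              (innerStepB (PySem.List.pyGetD matrix j [])) (v, b)).2 with
          | false => rfl
          | true => exact absurd (d3 hs) (by simp [hfa])
        obtain ⟨f1, f2⟩ := e4 hs2
        obtain ⟨g1, g2⟩ := d4 hfa
        have hpair : (PySem.List.pyRange 0 n 1).foldl
            (innerStepB (PySem.List.pyGetD matrix j [])) (v, b) = (v, false) :=
          Prod.ext_iff.mpr ⟨f1, hs2⟩
        simp only [hpair] at g1 g2 ⊢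
        refine ⟨g1, ?_⟩
        intro x hx hvx
        rcases List.mem_cons.1 hx with rfl | hx
        · intro i hiN hE
          have hmem : ((i : Int)) ∈ PySem.List.pyRange 0 n 1 :=
            PySem.List.mem_pyRange_one.2 ⟨by omega, by omega⟩
          have := f2 (i : Int) hmem (by simpa using hE)
          simpa using this
        · exact g2 x hx hvx
      · intro T hTcl hvT
        exact d5 T hTcl (e5 T hTcl hvT (hvT _ hvj) hjn)
      · intro h
        rcases d7 h with hs | hs
        · rcases e7 hs with hb | hb
          · exact Or.inl hb
          · exact Or.inr (lt_of_lt_of_le hb d6)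
        · exact Or.inr (lt_of_le_of_lt e6 hs)
    | false =>
      rw [List.foldl_cons, stepOutB_skip n j matrix v b hj0 hvj]
      obtain ⟨d1, d2, d3, d4, d5, d6, d7⟩ := ih v b hL' hlen
      refine ⟨d1, d2, d3, ?_, d5, d6, d7⟩
      intro hfa
      obtain ⟨g1, g2⟩ := d4 hfa
      refine ⟨g1, ?_⟩
      intro x hx hvx
      rcases List.mem_cons.1 hx with rfl | hx
      · rw [hvj] at hvx; cases hvx
      · exact g2 x hx hvx

theorem satB_main (n : Int) (matrix : List (List Int)) :
    ∀ (fuel : Nat) (v : List Bool), v.length = n.toNat →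
    n.toNat + 1 ≤ fuel + pvTC v →
    (satB n matrix fuel v).length = n.toNat ∧
    pvLe v (satB n matrix fuel v) ∧
    pvClosed n matrix (satB n matrix fuel v) ∧
    (∀ T : List Bool, pvClosed n matrix T → pvLe v T → pvLe (satB n matrix fuel v) T) := by
  intro fuel
  induction fuel with
  | zero =>
    intro v hlen hf
    have := pvTC_le_length v
    rw [hlen] at this
    exact absurd hf (by omega)
  | succ fuel ih =>
    intro v hlen hf
    simp only [satB, passB]
    have hLgood : ∀ i ∈ PySem.List.pyRange 0 n 1, 0 ≤ i ∧ i < n :=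
      fun i hi => PySem.List.mem_pyRange_one.1 hi
    obtain ⟨p1, p2, p3, p4, p5, p6, p7⟩ :=
      passB_main n matrix (PySem.List.pyRange 0 n 1) v false hLgood hlen
    cases hs : ((PySem.List.pyRange 0 n 1).foldl (outerStepB n matrix) (v, false)).2 with
    | true =>
      rw [if_pos rfl]
      have hstrict : pvTC v < pvTC ((PySem.List.pyRange 0 n 1).foldl
          (outerStepB n matrix) (v, false)).1 := by
        rcases p7 hs with h | h
        · cases h
        · exact h
      obtain ⟨q1, q2, q3, q4⟩ := ih _ p1 (by omega)
      exact ⟨q1, fun k h => q2 k (p2 k h), q3, fun T hTcl hvT => q4 T hTcl (p5 T hTcl hvT)⟩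
    | false =>
      rw [if_neg (by simp)]
      obtain ⟨f1, f2⟩ := p4 hs
      rw [f1]
      have hcl : pvClosed n matrix v := by
        intro j i hj hiN hvj hE
        have hmem : ((j : Int)) ∈ PySem.List.pyRange 0 n 1 :=
          PySem.List.mem_pyRange_one.2 ⟨by omega, by omega⟩
        have := f2 (j : Int) hmem (by simpa using hvj) i hiN (by simpa using hE)
        exact this
      exact ⟨hlen, fun k h => h, hcl, fun T _ hvT => hvT⟩

-- ---------- joint outer loop ----------

theorem stepEq (n : Int) (matrix : List (List Int)) (p : Int) (v : List Bool)
    (t : PySem.Set Int) (hlen : v.length = n.toNat) (hcl : pvClosed n matrix v)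
    (hp : 0 ≤ p ∧ p < n) (hnv : pvVG v p.toNat = false)
    (ht : ∀ x ∈ t, 0 ≤ x ∧ x < n ∧ pvVG v x.toNat = true) (hnd : t.Nodup) :
    (bfsA n matrix (2 * n.toNat + 1) [p] (v.set p.toNat true) t).1
        = satB n matrix (n.toNat + 1) (v.set p.toNat true) ∧
    (bfsA n matrix (2 * n.toNat + 1) [p] (v.set p.toNat true) t).1.length = n.toNat ∧
    pvClosed n matrix (bfsA n matrix (2 * n.toNat + 1) [p] (v.set p.toNat true) t).1 ∧
    (∀ x ∈ (bfsA n matrix (2 * n.toNat + 1) [p] (v.set p.toNat true) t).2,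
      0 ≤ x ∧ x < n ∧
        pvVG (bfsA n matrix (2 * n.toNat + 1) [p] (v.set p.toNat true) t).1 x.toNat = true) ∧
    (bfsA n matrix (2 * n.toNat + 1) [p] (v.set p.toNat true) t).2.Nodup ∧
    (bfsA n matrix (2 * n.toNat + 1) [p] (v.set p.toNat true) t).2.length + pvTC v + 1
      = t.length + pvTC (bfsA n matrix (2 * n.toNat + 1) [p] (v.set p.toNat true) t).1 := by
  have hlv : p.toNat < v.length := by omega
  have hlen' : (v.set p.toNat true).length = n.toNat := by simpa using hlen
  have hself : pvVG (v.set p.toNat true) p.toNat = true := pvVG_set_self hlv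
  have hTC' : pvTC (v.set p.toNat true) = pvTC v + 1 := pvTC_set hlv hnv
  have hq : ∀ x ∈ [p], 0 ≤ x ∧ x < n ∧ pvVG (v.set p.toNat true) x.toNat = true := by
    intro x hx; simp at hx; subst hx; exact ⟨hp.1, hp.2, hself⟩
  have hFr : ∀ k : Nat, k < n.toNat → pvVG (v.set p.toNat true) k = true → (k : Int) ∉ [p] →
      ∀ i : Nat, i < n.toNat → pvEN matrix k i → pvVG (v.set p.toNat true) i = true := by
    intro k hk hvk hknot i hi hE
    have hkp : k ≠ p.toNat := by
      intro he; subst he; apply hknot; simp; omega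
    rcases pvVG_set_cases hvk with he | hvk0
    · exact absurd he hkp
    · exact pvVG_set_mono (hcl k i hk hi hvk0 hE)
  have ht' : ∀ x ∈ t, 0 ≤ x ∧ x < n ∧ pvVG (v.set p.toNat true) x.toNat = true :=
    fun x hx => ⟨(ht x hx).1, (ht x hx).2.1, pvVG_set_mono (ht x hx).2.2⟩
  have hfuel : 2 * (n.toNat - pvTC (v.set p.toNat true)) + [p].length ≤ 2 * n.toNat + 1 := by
    simp only [List.length_cons, List.length_nil]; omega
  obtain ⟨a1, a2, a3, a4, a5, a6, a7⟩ :=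
    bfsA_main n matrix (2 * n.toNat + 1) [p] (v.set p.toNat true) t hlen' hq hFr ht' hnd hfuel
  obtain ⟨b1, b2, b3, b4⟩ := satB_main n matrix (n.toNat + 1) (v.set p.toNat true) hlen' (by omega)
  have hAB := a4 _ b3 b2 (fun x hx => by simp at hx; subst hx; exact b2 _ hself)
  have hBA := b4 _ a3 a2
  exact ⟨pvEq_of_le (by rw [a1, b1]) hAB hBA, a1, a3, a5, a6, by omega⟩

theorem stepOutA_vis (n : Int) (matrix : List (List Int)) (v : List Bool) (t : PySem.Set Int)
    (p : Int) (hp0 : 0 ≤ p) (h : pvVG v p.toNat = true) : stepOutA n matrix (v, t) p = (v, t) := by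
  simp only [pvVG] at h
  simp [stepOutA, PySem.List.pyGetD_of_nonneg _ _ hp0, List.getD_eq_getElem?_getD] at *
  simp [h]

theorem stepOutA_unvis (n : Int) (matrix : List (List Int)) (v : List Bool) (t : PySem.Set Int)
    (p : Int) (hp0 : 0 ≤ p) (h : pvVG v p.toNat = false) :
    stepOutA n matrix (v, t) p = bfsA n matrix (2 * n.toNat + 1) [p] (v.set p.toNat true) t := by
  simp only [pvVG] at h
  simp [stepOutA, PySem.List.pyGetD_of_nonneg _ _ hp0, PySem.List.pySetD_of_nonneg _ _ hp0,
    List.getD_eq_getElem?_getD] at *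
  simp [h]

theorem stepOutB_vis2 (n : Int) (matrix : List (List Int)) (v : List Bool) (r : Int)
    (p : Int) (hp0 : 0 ≤ p) (h : pvVG v p.toNat = true) : stepOutB n matrix (v, r) p = (v, r) := by
  simp only [pvVG] at h
  simp [stepOutB, PySem.List.pyGetD_of_nonneg _ _ hp0, List.getD_eq_getElem?_getD] at *
  simp [h]

theorem stepOutB_unvis (n : Int) (matrix : List (List Int)) (v : List Bool) (r : Int)
    (p : Int) (hp0 : 0 ≤ p) (h : pvVG v p.toNat = false) :
    stepOutB n matrix (v, r) p = (satB n matrix (n.toNat + 1) (v.set p.toNat true), r + 1) := by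
  simp only [pvVG] at h
  simp [stepOutB, PySem.List.pyGetD_of_nonneg _ _ hp0, PySem.List.pySetD_of_nonneg _ _ hp0,
    List.getD_eq_getElem?_getD] at *
  simp [h]

theorem outer_main (n : Int) (matrix : List (List Int)) :
    ∀ (cs : List Int) (v : List Bool) (t : PySem.Set Int) (roots : Nat),
    (∀ x ∈ cs, 0 ≤ x ∧ x < n) → v.length = n.toNat → pvClosed n matrix v →
    (∀ x ∈ t, 0 ≤ x ∧ x < n ∧ pvVG v x.toNat = true) → t.Nodup →
    t.length + roots = pvTC v →
    ∃ roots' : Nat,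
      (cs.foldl (stepOutA n matrix) (v, t)).1 = (cs.foldl (stepOutB n matrix) (v, (roots : Int))).1 ∧
      (cs.foldl (stepOutB n matrix) (v, (roots : Int))).2 = (roots' : Int) ∧
      (cs.foldl (stepOutA n matrix) (v, t)).2.length + roots'
        = pvTC (cs.foldl (stepOutA n matrix) (v, t)).1 := by
  intro cs
  induction cs with
  | nil =>
    intro v t roots _ _ _ _ _ hcount
    exact ⟨roots, rfl, rfl, hcount⟩
  | cons p cs ih =>
    intro v t roots hcs hlen hcl ht hnd hcount
    obtain ⟨hp0, hpn⟩ := hcs p (List.mem_cons_self ..)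
    have hcs' : ∀ x ∈ cs, 0 ≤ x ∧ x < n := fun x hx => hcs x (List.mem_cons_of_mem _ hx)
    simp only [List.foldl_cons]
    cases hv : pvVG v p.toNat with
    | true =>
      rw [stepOutA_vis n matrix v t p hp0 hv, stepOutB_vis2 n matrix v (roots : Int) p hp0 hv]
      exact ih v t roots hcs' hlen hcl ht hnd hcount
    | false =>
      rw [stepOutA_unvis n matrix v t p hp0 hv, stepOutB_unvis n matrix v (roots : Int) p hp0 hv]
      obtain ⟨s1, s2, s3, s4, s5, s6⟩ := stepEq n matrix p v t hlen hcl ⟨hp0, hpn⟩ hv ht hnd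
      rw [← s1]
      have hcast : ((roots : Int) + 1) = (((roots + 1 : Nat)) : Int) := by push_cast; ring
      rw [hcast]
      refine ih _ _ (roots + 1) hcs' s2 s3 s4 s5 ?_
      show (bfsA n matrix (2 * n.toNat + 1) [p] (v.set p.toNat true) t).2.length + (roots + 1)
          = pvTC (bfsA n matrix (2 * n.toNat + 1) [p] (v.set p.toNat true) t).1
      omega

-- ===== VERDICT (by name: the statement is the Claim_ definition above) =====
theorem find_contacts_spec : Claim_equal_find_contacts := by
  intro n confirmed matrix _ hPre
  obtain ⟨hconf, -⟩ := hPre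
  have hv0len : (List.replicate n.toNat false).length = n.toNat := by simp
  have hcl0 : pvClosed n matrix (List.replicate n.toNat false) := by
    intro j i _ _ hvj _
    rw [pvVG_replicate] at hvj; cases hvj
  obtain ⟨roots', he, hr, hc⟩ := outer_main n matrix confirmed (List.replicate n.toNat false)
    PySem.Set.empty 0 hconf hv0len hcl0
    (by intro x hx; simp [PySem.Set.empty] at hx) (by simp [PySem.Set.empty])
    (by simp [PySem.Set.empty, pvTC_replicate])
  show find_contacts n confirmed matrix = find_contacts_alt n confirmed matrix
  simp only [find_contacts, find_contacts_alt]
  simp only [Nat.cast_zero] at he hr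
  rw [pvSumFold, ← he, hr, PySem.Set.len]
  omega
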